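-- pv_equiv track=rewrite | github.com/krzysztof-kopel/Algorytmy_Geometryczne_Projekt | algo/delaunay.py | supertriangle
-- ===== SOURCE A (Python) =====
-- def supertriangle(points):
--     min_x = min(point[0] for point in points)
--     max_x = max(point[0] for point in points)
--     min_y = min(point[1] for point in points)
--     max_y = max(point[1] for point in points)
--     dif_x = max_x - min_x
--     dif_y = max_y - min_y
--     p1 = [min_x -  dif_x, min_y - dif_y]
--     p2 = [max_x + 2 * dif_x, min_y - dif_y]
--     p3 = [min_x - dif_x, max_y + 2 * dif_y]
--     return [p1, p2, p3]
-- ===== SOURCE B (Python) =====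
-- def supertriangle(points):
--     xs = sorted(point[0] for point in points)
--     ys = sorted(point[1] for point in points)
--     min_x, max_x = xs[0], xs[-1]
--     min_y, max_y = ys[0], ys[-1]
--     dif_x = max_x - min_x
--     dif_y = max_y - min_y
--     return [[min_x - dif_x, min_y - dif_y],
--             [max_x + 2 * dif_x, min_y - dif_y],
--             [min_x - dif_x, max_y + 2 * dif_y]]
-- ===== Notes on version B (the rewrite author's own statement) =====
-- stated objective: alternative
-- what changed: Instead of four min/max scans, B sorts the x-coordinate and y-coordinate lists and reads the extrema off the ends of the sorted lists (sort-then-pick vs scan-for-extremum).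
import Mathlib
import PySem

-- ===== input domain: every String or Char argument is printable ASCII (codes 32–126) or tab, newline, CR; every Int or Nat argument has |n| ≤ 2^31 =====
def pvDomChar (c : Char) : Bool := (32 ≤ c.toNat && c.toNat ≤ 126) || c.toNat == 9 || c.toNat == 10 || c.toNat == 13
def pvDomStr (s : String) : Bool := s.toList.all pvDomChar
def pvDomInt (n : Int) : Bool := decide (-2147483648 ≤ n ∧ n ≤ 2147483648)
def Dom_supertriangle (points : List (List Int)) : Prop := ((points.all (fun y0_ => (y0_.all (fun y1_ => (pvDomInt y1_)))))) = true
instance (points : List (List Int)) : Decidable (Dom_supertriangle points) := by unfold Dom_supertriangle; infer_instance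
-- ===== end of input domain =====

-- B reads the bounding-box extrema off the ends of sorted coordinate lists instead of A's four min/max scans (objective: alternative).


-- ===== PORT A =====
-- min(point[0] for point in points) etc.: four extrema over the two coordinate streams.
-- point[0]/point[1] are ported as pyGetD with default 0: Pre_ guarantees the index is in range.
def supertriangle (points : List (List Int)) : List (List Int) :=
  match PySem.List.min? (points.map (fun p => PySem.List.pyGetD p 0 0)) (fun y => y),
        PySem.List.max? (points.map (fun p => PySem.List.pyGetD p 0 0)) (fun y => y),
        PySem.List.min? (points.map (fun p => PySem.List.pyGetD p 1 0)) (fun y => y),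
        PySem.List.max? (points.map (fun p => PySem.List.pyGetD p 1 0)) (fun y => y) with
  | some min_x, some max_x, some min_y, some max_y =>
      let dif_x := max_x - min_x
      let dif_y := max_y - min_y
      [[min_x - dif_x, min_y - dif_y],
       [max_x + 2 * dif_x, min_y - dif_y],
       [min_x - dif_x, max_y + 2 * dif_y]]
  | _, _, _, _ => []  -- min() of an empty sequence raises in Python; Pre_ excludes points = []

-- ===== PORT B =====
-- xs = sorted(p[0] …), ys = sorted(p[1] …); extrema are xs[0], xs[-1], ys[0], ys[-1].
def supertriangle_alt (points : List (List Int)) : List (List Int) :=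
  let xs := PySem.List.sorted (points.map (fun p => PySem.List.pyGetD p 0 0)) (fun y => y) false
  let ys := PySem.List.sorted (points.map (fun p => PySem.List.pyGetD p 1 0)) (fun y => y) false
  -- xs[0]/xs[-1]/ys[0]/ys[-1]; Python raises IndexError on an empty list (excluded by Pre_),
  -- so each lookup is matched in sequence, none short-circuiting to [].
  match PySem.List.pyGet? xs 0 with
  | none => []
  | some min_x =>
    match PySem.List.pyGet? xs (-1) with
    | none => []
    | some max_x =>
      match PySem.List.pyGet? ys 0 with
      | none => []
      | some min_y =>
        match PySem.List.pyGet? ys (-1) with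
        | none => []
        | some max_y =>
          let dif_x := max_x - min_x
          let dif_y := max_y - min_y
          [[min_x - dif_x, min_y - dif_y],
           [max_x + 2 * dif_x, min_y - dif_y],
           [min_x - dif_x, max_y + 2 * dif_y]]

-- ===== PRECONDITION & SPEC =====
-- Pre_ excludes exactly the inputs where the Python programs raise: the empty list
-- (min()/xs[0] of an empty sequence) and points with fewer than two coordinates
-- (IndexError on point[0]/point[1]).
def Pre_supertriangle (points : List (List Int)) : Prop :=
  points ≠ [] ∧ (points.all (fun p => 2 ≤ p.length)) = true
instance (points : List (List Int)) : Decidable (Pre_supertriangle points) := by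
  unfold Pre_supertriangle; infer_instance
def pvWitness_supertriangle : List (List Int) := [[0, 1], [3, -2]]

def Spec_supertriangle (points : List (List Int)) (out : List (List Int)) : Prop := out = supertriangle_alt points
instance (points : List (List Int)) (out : List (List Int)) : Decidable (Spec_supertriangle points out) := by unfold Spec_supertriangle; infer_instance

-- ===== CLAIM =====
def Claim_equal_supertriangle : Prop := ∀ (points : List (List Int)), Dom_supertriangle points → Pre_supertriangle points → Spec_supertriangle points (supertriangle points)

-- ===== LEMMAS AND PROOFS =====
-- The head of sorted(x :: t) is the running-min fold (Python's min), its last element the running-max fold.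
theorem sorted_head_min (x : Int) (t : List Int) :
    PySem.List.pyGet? (PySem.List.sorted (x :: t) (fun y => y) false) 0
      = some (t.foldl min x) := by
  rw [PySem.List.pyGet?_zero]
  rcases hs : PySem.List.sorted (x :: t) (fun y => y) false with _ | ⟨m, rest⟩
  · exact absurd ((PySem.List.sorted_eq_nil_iff _ _ _).mp hs) (by simp)
  · have hm_mem : m ∈ x :: t := by
      rw [← PySem.List.mem_sorted (x :: t) (fun y => y) false m, hs]; simp
    have hm_le : ∀ y ∈ x :: t, m ≤ y := PySem.List.key_head_sorted_le _ _ hs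
    have hf : PySem.List.min? (x :: t) (fun y => y) = some (t.foldl min x) :=
      PySem.List.min?_id_cons x t
    have hfm : t.foldl min x ∈ x :: t := PySem.List.min?_mem hf
    have hfl : ∀ y ∈ x :: t, t.foldl min x ≤ y := PySem.List.min?_isMin hf
    simp only [List.getElem?_cons_zero, Option.some.injEq]
    exact le_antisymm (hm_le _ hfm) (hfl _ hm_mem)

theorem sorted_last_max (x : Int) (t : List Int) :
    PySem.List.pyGet? (PySem.List.sorted (x :: t) (fun y => y) false) (-1)
      = some (t.foldl max x) := by
  rw [PySem.List.pyGet?_neg_one]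
  have hne : PySem.List.sorted (x :: t) (fun y => y) false ≠ [] := by
    rw [Ne, PySem.List.sorted_eq_nil_iff]; simp
  rw [List.getLast?_eq_some_getLast hne]
  have hlm : (PySem.List.sorted (x :: t) (fun y => y) false).getLast hne ∈ x :: t := by
    rw [← PySem.List.mem_sorted (x :: t) (fun y => y) false]
    exact List.getLast_mem hne
  have hge : ∀ y ∈ x :: t, y ≤ (PySem.List.sorted (x :: t) (fun y => y) false).getLast hne := by
    intro y hy
    have hys : y ∈ PySem.List.sorted (x :: t) (fun y => y) false := by
      rw [PySem.List.mem_sorted]; exact hy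
    obtain ⟨p, hp, hpe⟩ := List.getElem_of_mem hys
    rw [List.getLast_eq_getElem hne, ← hpe]
    exact PySem.List.sorted_id_getElem_mono (x :: t) (by omega) (by omega)
  have hf : PySem.List.max? (x :: t) (fun y => y) = some (t.foldl max x) :=
      PySem.List.max?_id_cons x t
  have hfm : t.foldl max x ∈ x :: t := PySem.List.max?_mem hf
  have hfl : ∀ y ∈ x :: t, y ≤ t.foldl max x := PySem.List.max?_isMax hf
  exact congrArg some (le_antisymm (hfl _ hlm) (hge _ hfm))

theorem supertriangle_spec : Claim_equal_supertriangle := by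
  intro points _ hpre
  unfold Spec_supertriangle supertriangle supertriangle_alt
  cases points with
  | nil => exact absurd rfl hpre.1
  | cons p0 rest =>
      simp only [List.map_cons, PySem.List.min?_id_cons, PySem.List.max?_id_cons,
        sorted_head_min, sorted_last_max]
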